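-- pv_equiv track=rewrite | github.com/dpvyt15/RRAM-FPCA | Multiplication/CheckIt.py | BWSplit
-- ===== SOURCE A (Python) =====
-- import math
--
-- def BWSplit(BW):
-- 	l1=int(BW/8)
-- 	t1=int(math.ceil(l1/10))
-- 	t2=int(math.ceil((l1+9)/9))
-- 	ArrPulse=[[[[-8 for i in range(9)] for j in range(10)] for k in range(t2)] for e in range(t1)]
-- 	ArrRRAM=[[[[-8 for i in range(9)] for j in range(10)] for k in range(t2)] for e in range(t1)]
-- 	for u in range(t1):
-- 		start1=0
-- 		for i in range(t2):
-- 			for j in range(10):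
-- 				ax=u*10+(9-j)
-- 				if(ax<l1):
-- 					for k in range(9):
-- 						t=-8*(9-j)+start1+8*k
-- 						if(t<BW):
-- 							ArrPulse[u][i][j][k]=t
-- 						else:
-- 							ArrPulse[u][i][j][k]=-8
-- 			start1=start1+(9*8)
--
-- 	for u in range(t1):
-- 		count=0
-- 		Lo=9
-- 		Up=10
-- 		for i in range(t2):
-- 			for k in range(9):
-- 				for j in range(Lo,Up,1):
-- 					t=u*10+9-j
-- 					if(t<l1):
-- 						ArrRRAM[u][i][j][k]=t*8
-- 					else:
-- 						ArrRRAM[u][i][j][k]=-8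
-- 				if(count<l1):
-- 					count=count+1
-- 				if(Lo>0):
-- 					Lo=Lo-1
-- 				if(count==l1):
-- 					Up=Up-1
-- 	return(ArrRRAM,ArrPulse)
-- ===== SOURCE B (Python) =====
-- import math
--
-- def BWSplit(BW):
--     l1 = int(BW / 8)
--     t1 = int(math.ceil(l1 / 10))
--     t2 = int(math.ceil((l1 + 9) / 9))
--
--     def pulse(u, i, j, k):
--         t = -8 * (9 - j) + 72 * i + 8 * k
--         return t if (u * 10 + 9 - j < l1 and t < BW) else -8
--
--     def rram(u, i, j, k):
--         m = i * 9 + k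
--         lo = max(9 - m, 0)
--         up = 10 - max(0, m - l1 + 1)
--         t = u * 10 + 9 - j
--         return t * 8 if (lo <= j < up and t < l1) else -8
--
--     ArrPulse = [[[[pulse(u, i, j, k) for k in range(9)] for j in range(10)]
--                  for i in range(t2)] for u in range(t1)]
--     ArrRRAM = [[[[rram(u, i, j, k) for k in range(9)] for j in range(10)]
--                 for i in range(t2)] for u in range(t1)]
--     return (ArrRRAM, ArrPulse)
-- ===== Notes on version B (the rewrite author's own statement) =====
-- stated objective: simpler
-- what changed: A builds -8-filled 4D arrays and then mutates cells in stateful sweeps that thread start1 and count/Lo/Up accumulators across the (i,k) steps; B computes every cell directly by closed-form index arithmetic (start1 = 72*i, window Lo = max(9-m,0), Up = 10-max(0,m-l1+1) for step m = 9*i+k) inside nested comprehensions, with no mutation and no loop-carried state.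
import Mathlib
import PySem

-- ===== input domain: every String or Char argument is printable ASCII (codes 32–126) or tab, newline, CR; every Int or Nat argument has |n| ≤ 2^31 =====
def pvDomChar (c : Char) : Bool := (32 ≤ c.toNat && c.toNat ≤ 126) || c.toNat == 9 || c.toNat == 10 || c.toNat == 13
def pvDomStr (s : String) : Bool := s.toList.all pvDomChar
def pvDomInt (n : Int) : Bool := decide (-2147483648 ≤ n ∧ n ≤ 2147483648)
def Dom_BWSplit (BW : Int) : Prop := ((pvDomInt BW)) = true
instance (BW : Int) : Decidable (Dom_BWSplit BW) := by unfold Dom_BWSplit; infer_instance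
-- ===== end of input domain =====

-- B replaces A's stateful sweeps (threaded start1 / count / Lo / Up accumulators mutating
-- pre-built 4D arrays) by direct index arithmetic in comprehensions; same cost, simpler structure.

-- ===== PORT A =====
-- ArrX[u][i][j][k] = v : all four indices are Python range values, nonnegative and in range,
-- so nested List.modify / List.set is exact here.
def pvSet4 (A : List (List (List (List Int)))) (u i j k : Nat) (v : Int) : List (List (List (List Int))) :=
  A.modify u (fun s => s.modify i (fun p => p.modify j (fun r => r.set k v)))

-- l1 = int(BW/8): truncating division, exact on |BW| ≤ 2^31 < 2^53.
-- t1 = int(math.ceil(l1/10)), t2 = int(math.ceil((l1+9)/9)): ceiling division -((-a)//b),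
-- exact since |l1| ≤ 2^28 keeps the float quotients well away from wrong-side rounding.
def BWSplit (BW : Int) : List (List (List (List Int))) × List (List (List (List Int))) :=
  let l1 := PySem.Int.truncdiv BW 8
  let t1 := -(PySem.Int.floordiv (-l1) 10)
  let t2 := -(PySem.Int.floordiv (-(l1+9)) 9)
  let init : List (List (List (List Int))) :=
    (PySem.List.pyRange 0 t1 1).map (fun _ =>
      (PySem.List.pyRange 0 t2 1).map (fun _ =>
        (PySem.List.pyRange 0 10 1).map (fun _ =>
          (PySem.List.pyRange 0 9 1).map (fun _ => (-8 : Int)))))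
  let ArrPulse :=
    (PySem.List.pyRange 0 t1 1).foldl (fun A u =>
      ((PySem.List.pyRange 0 t2 1).foldl (fun (As : List (List (List (List Int))) × Int) i =>
        let A2 := (PySem.List.pyRange 0 10 1).foldl (fun A j =>
          if u*10+(9-j) < l1 then
            (PySem.List.pyRange 0 9 1).foldl (fun A k =>
              if -8*(9-j)+As.2+8*k < BW then pvSet4 A u.toNat i.toNat j.toNat k.toNat (-8*(9-j)+As.2+8*k)
              else pvSet4 A u.toNat i.toNat j.toNat k.toNat (-8)) A
          else A) As.1
        (A2, As.2 + 9*8)) (A, 0)).1) init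
  let ArrRRAM :=
    (PySem.List.pyRange 0 t1 1).foldl (fun A u =>
      ((PySem.List.pyRange 0 t2 1).foldl (fun (S : List (List (List (List Int))) × Int × Int × Int) i =>
        (PySem.List.pyRange 0 9 1).foldl (fun (S : List (List (List (List Int))) × Int × Int × Int) k =>
          let A2 := (PySem.List.pyRange S.2.2.1 S.2.2.2 1).foldl (fun A j =>
            if u*10+9-j < l1 then pvSet4 A u.toNat i.toNat j.toNat k.toNat ((u*10+9-j)*8)
            else pvSet4 A u.toNat i.toNat j.toNat k.toNat (-8)) S.1
          let count := if S.2.1 < l1 then S.2.1 + 1 else S.2.1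
          let Lo := if S.2.2.1 > 0 then S.2.2.1 - 1 else S.2.2.1
          let Up := if count = l1 then S.2.2.2 - 1 else S.2.2.2
          (A2, count, Lo, Up)) S) (A, (0, 9, 10))).1) init
  (ArrRRAM, ArrPulse)

-- ===== PORT B =====
def BWSplit_alt (BW : Int) : List (List (List (List Int))) × List (List (List (List Int))) :=
  let l1 := PySem.Int.truncdiv BW 8
  let t1 := -(PySem.Int.floordiv (-l1) 10)
  let t2 := -(PySem.Int.floordiv (-(l1+9)) 9)
  let pulse : Int → Int → Int → Int → Int := fun u i j k =>
    let t := -8*(9-j) + 72*i + 8*k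
    if u*10+9-j < l1 ∧ t < BW then t else -8
  let rram : Int → Int → Int → Int → Int := fun u i j k =>
    let m := i*9+k
    let lo := max (9-m) 0
    let up := 10 - max 0 (m - l1 + 1)
    let t := u*10+9-j
    if lo ≤ j ∧ j < up ∧ t < l1 then t*8 else -8
  let ArrPulse :=
    (PySem.List.pyRange 0 t1 1).map (fun u => (PySem.List.pyRange 0 t2 1).map (fun i =>
      (PySem.List.pyRange 0 10 1).map (fun j => (PySem.List.pyRange 0 9 1).map (fun k => pulse u i j k))))
  let ArrRRAM :=
    (PySem.List.pyRange 0 t1 1).map (fun u => (PySem.List.pyRange 0 t2 1).map (fun i =>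
      (PySem.List.pyRange 0 10 1).map (fun j => (PySem.List.pyRange 0 9 1).map (fun k => rram u i j k))))
  (ArrRRAM, ArrPulse)

-- ===== PRECONDITION & SPEC =====
def Spec_BWSplit (BW : Int) (out : List (List (List (List Int))) × List (List (List (List Int)))) : Prop := out = BWSplit_alt BW
instance (BW : Int) (out : List (List (List (List Int))) × List (List (List (List Int)))) : Decidable (Spec_BWSplit BW out) := by unfold Spec_BWSplit; infer_instance

-- ===== CLAIM (what is proved, stated in full; the proofs are below) =====
def Claim_equal_BWSplit : Prop := ∀ (BW : Int), Dom_BWSplit BW → Spec_BWSplit BW (BWSplit BW)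

-- ===== LEMMAS AND PROOFS =====

-- generic facts about the programs' update shapes

theorem pvModify_modify {a : Type} (l : List a) (u : Nat) (f g : a → a) :
    (l.modify u f).modify u g = l.modify u (fun x => g (f x)) := by
  apply List.ext_getElem?
  intro q
  simp only [List.getElem?_modify]
  cases l[q]? <;> simp
  split <;> simp

theorem pvModify_id' {a : Type} (l : List a) (u : Nat) :
    l.modify u (fun x => x) = l := by
  have h : (fun (x : a) => x) = id := rfl
  rw [h, List.modify_id]

theorem pvFoldl_modify_const {a b : Type} (u : Nat) (g : b → a → a) (xs : List b) :
    ∀ (l : List a), xs.foldl (fun A x => A.modify u (g x)) l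
      = l.modify u (fun s => xs.foldl (fun s x => g x s) s) := by
  induction xs with
  | nil => intro l; exact (pvModify_id' l u).symm
  | cons x xs ih =>
      intro l
      simp only [List.foldl_cons]
      rw [ih, pvModify_modify]

theorem pvFoldl_condModify {a : Type} (c : Int → Prop) [DecidablePred c] (g : Int → a → a) :
    ∀ (xs : List Int), xs.Nodup → (∀ x ∈ xs, 0 ≤ x) → ∀ (l : List a) (q : Nat),
    (xs.foldl (fun l x => if c x then l.modify x.toNat (g x) else l) l)[q]? =
      if (q : Int) ∈ xs ∧ c (q : Int) then (g (q : Int)) <$> l[q]? else l[q]? := by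
  intro xs
  induction xs with
  | nil => intro _ _ l q; simp
  | cons x xs ih =>
      intro hnd hnn l q
      have hx : 0 ≤ x := hnn x (by simp)
      have hxs : ∀ y ∈ xs, 0 ≤ y := fun y hy => hnn y (by simp [hy])
      have hnd' : xs.Nodup := (List.nodup_cons.mp hnd).2
      have hxnot : x ∉ xs := (List.nodup_cons.mp hnd).1
      simp only [List.foldl_cons]
      rw [ih hnd' hxs]
      by_cases hqx : (q : Int) = x
      · have hqn : x.toNat = q := by omega
        have hq_notin : ¬((q : Int) ∈ xs ∧ c (q : Int)) := fun h => by
          rw [hqx] at h; exact hxnot h.1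
        rw [if_neg hq_notin]
        by_cases hc : c x
        · rw [if_pos hc, List.getElem?_modify, if_pos ⟨by simp [hqx], by rwa [hqx]⟩]
          rw [hqx]
          cases l[q]? <;> simp [hqn]
        · rw [if_neg hc, if_neg (fun h => hc (hqx ▸ h.2))]
      · have hne : x.toNat ≠ q := by omega
        have hmem : ((q:Int) ∈ x :: xs ∧ c (q:Int)) ↔ ((q:Int) ∈ xs ∧ c (q:Int)) := by
          simp [List.mem_cons, hqx]
        by_cases hc : c x
        · rw [if_pos hc, List.getElem?_modify]
          have hmap : ((fun v => if x.toNat = q then g x v else v) <$> l[q]?) = l[q]? := by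
            cases l[q]? <;> simp [hne]
          rw [hmap]
          by_cases hm : (q:Int) ∈ xs ∧ c (q:Int)
          · rw [if_pos hm, if_pos (hmem.mpr hm)]
          · rw [if_neg hm, if_neg (fun h => hm (hmem.mp h))]
        · rw [if_neg hc]
          by_cases hm : (q:Int) ∈ xs ∧ c (q:Int)
          · rw [if_pos hm, if_pos (hmem.mpr hm)]
          · rw [if_neg hm, if_neg (fun h => hm (hmem.mp h))]

theorem pvFoldl_modifyAll {a : Type} (g : Int → a → a) (xs : List Int)
    (hnd : xs.Nodup) (hnn : ∀ x ∈ xs, 0 ≤ x) (l : List a) (q : Nat) :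
    (xs.foldl (fun l x => l.modify x.toNat (g x)) l)[q]? =
      if (q : Int) ∈ xs then (g (q : Int)) <$> l[q]? else l[q]? := by
  have hbody : (fun (l : List a) (x : Int) => l.modify x.toNat (g x))
      = (fun (l : List a) (x : Int) => if (fun (_ : Int) => True) x then l.modify x.toNat (g x) else l) := by
    funext l x; simp
  rw [hbody, pvFoldl_condModify (fun _ => True) g xs hnd hnn l q]
  simp

theorem pvSet_eq_modify {a : Type} (l : List a) (i : Nat) (v : a) :
    l.set i v = l.modify i (fun _ => v) := by
  apply List.ext_getElem?
  intro q
  rw [List.getElem?_set, List.getElem?_modify]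
  by_cases h : i = q
  · subst h
    by_cases hlen : i < l.length
    · simp [List.getElem?_eq_getElem hlen, hlen]
    · rw [List.getElem?_eq_none (by omega : l.length ≤ i)]
      simp [hlen]
  · simp [h]

theorem pvRange_nonneg (b T : Int) (hb : 0 ≤ b) :
    ∀ x ∈ PySem.List.pyRange b T 1, 0 ≤ x := fun x hx => by
  have := (PySem.List.mem_pyRange_one.mp hx).1; omega

-- default row / plane / slab (the -8-filled structures A starts from)
def pvRow0 : List Int := (PySem.List.pyRange 0 9 1).map (fun _ => (-8:Int))
def pvPlane0 : List (List Int) := (PySem.List.pyRange 0 10 1).map (fun _ => pvRow0)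
def pvSlab0 (t2 : Int) : List (List (List Int)) := (PySem.List.pyRange 0 t2 1).map (fun _ => pvPlane0)

-- ===== pulse side =====

def pvRowFillP (BW j s : Int) (r : List Int) : List Int :=
  (PySem.List.pyRange 0 9 1).foldl
    (fun r k => r.set k.toNat (if -8*(9-j)+s+8*k < BW then -8*(9-j)+s+8*k else -8)) r

def pvPlaneP (BW l1 u s : Int) (p : List (List Int)) : List (List Int) :=
  (PySem.List.pyRange 0 10 1).foldl
    (fun p j => if u*10+(9-j) < l1 then p.modify j.toNat (pvRowFillP BW j s) else p) p

def pvSlabP (BW l1 u t2 : Int) (sl : List (List (List Int))) : List (List (List Int)) :=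
  (PySem.List.pyRange 0 t2 1).foldl (fun sl i => sl.modify i.toNat (pvPlaneP BW l1 u (72*i))) sl

theorem pvPulse_kfold (BW u i j s : Int) (A : List (List (List (List Int)))) :
    (PySem.List.pyRange 0 9 1).foldl
      (fun A k => if -8*(9-j)+s+8*k < BW then pvSet4 A u.toNat i.toNat j.toNat k.toNat (-8*(9-j)+s+8*k)
                  else pvSet4 A u.toNat i.toNat j.toNat k.toNat (-8)) A
      = A.modify u.toNat (fun sl => sl.modify i.toNat (fun p => p.modify j.toNat (pvRowFillP BW j s))) := by
  have hbody : (fun (A : List (List (List (List Int)))) (k : Int) =>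
      if -8*(9-j)+s+8*k < BW then pvSet4 A u.toNat i.toNat j.toNat k.toNat (-8*(9-j)+s+8*k)
      else pvSet4 A u.toNat i.toNat j.toNat k.toNat (-8))
      = (fun A k => A.modify u.toNat (fun sl => sl.modify i.toNat (fun p => p.modify j.toNat
          (fun r => r.set k.toNat (if -8*(9-j)+s+8*k < BW then -8*(9-j)+s+8*k else -8))))) := by
    funext A k
    by_cases h : -8*(9-j)+s+8*k < BW
    · have h2 : -(8*(9-j)) + s + 8*k < BW := by omega
      simp [pvSet4, h2]
    · have h2 : ¬(-(8*(9-j)) + s + 8*k < BW) := by omega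
      simp [pvSet4, h2]
  rw [hbody]
  refine (pvFoldl_modify_const _ _ _ _).trans ?_
  congr 1
  funext sl
  refine (pvFoldl_modify_const _ _ _ _).trans ?_
  congr 1
  funext p
  exact pvFoldl_modify_const _ _ _ _

theorem pvPulse_jfold (BW l1 u i s : Int) (A : List (List (List (List Int)))) :
    (PySem.List.pyRange 0 10 1).foldl
      (fun A j => if u*10+(9-j) < l1 then
          (PySem.List.pyRange 0 9 1).foldl
            (fun A k => if -8*(9-j)+s+8*k < BW then pvSet4 A u.toNat i.toNat j.toNat k.toNat (-8*(9-j)+s+8*k)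
                        else pvSet4 A u.toNat i.toNat j.toNat k.toNat (-8)) A
        else A) A
      = A.modify u.toNat (fun sl => sl.modify i.toNat (pvPlaneP BW l1 u s)) := by
  have hbody : (fun (A : List (List (List (List Int)))) (j : Int) =>
      if u*10+(9-j) < l1 then
        (PySem.List.pyRange 0 9 1).foldl
          (fun A k => if -8*(9-j)+s+8*k < BW then pvSet4 A u.toNat i.toNat j.toNat k.toNat (-8*(9-j)+s+8*k)
                      else pvSet4 A u.toNat i.toNat j.toNat k.toNat (-8)) A
      else A)
      = (fun A j => A.modify u.toNat (fun sl => sl.modify i.toNat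
          (fun p => if u*10+(9-j) < l1 then p.modify j.toNat (pvRowFillP BW j s) else p))) := by
    funext A j
    by_cases h : u*10+(9-j) < l1
    · simp only [if_pos h]
      rw [pvPulse_kfold]
    · simp only [if_neg h]
      have e1 : (fun (sl : List (List (List Int))) => sl.modify i.toNat (fun p => p))
          = (fun sl => sl) := by
        funext sl; exact pvModify_id' sl i.toNat
      rw [e1, pvModify_id']
  rw [hbody]
  refine (pvFoldl_modify_const _ _ _ _).trans ?_
  congr 1
  funext sl
  exact pvFoldl_modify_const _ _ _ _

theorem pvPairElim {a : Type} (step : a → Int → Int → a) (d : Int) :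
    ∀ (n : Nat) (b : Int) (A : a) (s : Int),
    ((PySem.List.pyRange b (b + (n:Int)) 1).foldl (fun As i => (step As.1 i As.2, As.2 + d)) (A, s)).1
      = (PySem.List.pyRange b (b + (n:Int)) 1).foldl (fun A i => step A i (s + d*(i - b))) A := by
  intro n
  induction n with
  | zero => intro b A s; simp
  | succ m ih =>
      intro b A s
      rw [PySem.List.pyRange_one_cons (by push_cast; omega : b < b + ((m+1:Nat):Int))]
      simp only [List.foldl_cons]
      have h1 : b + ((m+1:Nat):Int) = (b+1) + ((m:Nat):Int) := by push_cast; ring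
      rw [h1]
      rw [ih (b+1) (step A b s) (s+d)]
      have h2 : step A b (s + d*(b - b)) = step A b s := by
        have e : s + d*(b - b) = s := by ring
        rw [e]
      rw [h2]
      refine PySem.List.foldl_congr_mem _ _ _ _ ?_
      intro acc x _
      congr 1
      ring

theorem pvPairElim' {a : Type} (step : a → Int → Int → a) (d T : Int) (A : a) (s : Int) :
    ((PySem.List.pyRange 0 T 1).foldl (fun As i => (step As.1 i As.2, As.2 + d)) (A, s)).1
      = (PySem.List.pyRange 0 T 1).foldl (fun A i => step A i (s + d*i)) A := by
  by_cases hT : T ≤ 0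
  · simp [PySem.List.pyRange_one_eq_nil hT]
  · have h : (0:Int) + (T.toNat : Int) = T := by omega
    have h2 := pvPairElim step d T.toNat 0 A s
    rw [h] at h2
    rw [h2]
    refine PySem.List.foldl_congr_mem _ _ _ _ ?_
    intro acc x _
    congr 1
    ring

theorem pvPulse_ubody (BW l1 t2 u : Int) (A : List (List (List (List Int)))) :
    ((PySem.List.pyRange 0 t2 1).foldl
      (fun (As : List (List (List (List Int))) × Int) i =>
        ((PySem.List.pyRange 0 10 1).foldl (fun A j =>
          if u*10+(9-j) < l1 then
            (PySem.List.pyRange 0 9 1).foldl (fun A k =>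
              if -8*(9-j)+As.2+8*k < BW then pvSet4 A u.toNat i.toNat j.toNat k.toNat (-8*(9-j)+As.2+8*k)
              else pvSet4 A u.toNat i.toNat j.toNat k.toNat (-8)) A
          else A) As.1, As.2 + 9*8)) (A, 0)).1
      = A.modify u.toNat (pvSlabP BW l1 u t2) := by
  rw [pvPairElim' (fun A i s =>
        (PySem.List.pyRange 0 10 1).foldl (fun A j =>
          if u*10+(9-j) < l1 then
            (PySem.List.pyRange 0 9 1).foldl (fun A k =>
              if -8*(9-j)+s+8*k < BW then pvSet4 A u.toNat i.toNat j.toNat k.toNat (-8*(9-j)+s+8*k)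
              else pvSet4 A u.toNat i.toNat j.toNat k.toNat (-8)) A
          else A) A) (9*8) t2 A 0]
  have hstep : ∀ (A : List (List (List (List Int)))), ∀ i ∈ PySem.List.pyRange 0 t2 1,
      (PySem.List.pyRange 0 10 1).foldl (fun A j =>
          if u*10+(9-j) < l1 then
            (PySem.List.pyRange 0 9 1).foldl (fun A k =>
              if -8*(9-j)+(0+9*8*i)+8*k < BW then pvSet4 A u.toNat i.toNat j.toNat k.toNat (-8*(9-j)+(0+9*8*i)+8*k)
              else pvSet4 A u.toNat i.toNat j.toNat k.toNat (-8)) A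
          else A) A
        = A.modify u.toNat (fun sl => sl.modify i.toNat (pvPlaneP BW l1 u (72*i))) := by
    intro A i _
    rw [pvPulse_jfold BW l1 u i (0+9*8*i) A]
    have e : (0:Int)+9*8*i = 72*i := by ring
    rw [e]
  rw [PySem.List.foldl_congr_mem _ _ _ _ hstep]
  exact pvFoldl_modify_const _ _ _ _

theorem pvPulse_row (BW l1 u i j : Int) (hc : u*10+(9-j) < l1) :
    pvRowFillP BW j (72*i) pvRow0
      = (PySem.List.pyRange 0 9 1).map
          (fun k => if u*10+9-j < l1 ∧ -8*(9-j) + 72*i + 8*k < BW then -8*(9-j) + 72*i + 8*k else -8) := by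
  have hc' : u*10+9-j < l1 := by omega
  unfold pvRowFillP
  have hbody : (fun (r : List Int) (k : Int) =>
      r.set k.toNat (if -8*(9-j)+72*i+8*k < BW then -8*(9-j)+72*i+8*k else -8))
      = (fun r k => r.modify k.toNat (fun _ => (if -8*(9-j)+72*i+8*k < BW then -8*(9-j)+72*i+8*k else -8))) := by
    funext r k; rw [pvSet_eq_modify]
  rw [hbody]
  apply List.ext_getElem?
  intro q
  rw [pvFoldl_modifyAll (fun k => fun _ => (if -8*(9-j)+72*i+8*k < BW then -8*(9-j)+72*i+8*k else -8))
        (PySem.List.pyRange 0 9 1) (PySem.List.nodup_pyRange_one 0 9) (pvRange_nonneg 0 9 le_rfl) pvRow0 q]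
  unfold pvRow0
  rw [List.getElem?_map, List.getElem?_map]
  by_cases hq9 : q < 9
  · have hqs : (PySem.List.pyRange 0 9 1)[q]? = some (0+(q:Int)) := by
      rw [PySem.List.getElem?_pyRange_one, if_pos (by omega)]
    have hqm : (q:Int) ∈ PySem.List.pyRange 0 9 1 := PySem.List.mem_pyRange_one.mpr ⟨by omega, by omega⟩
    rw [if_pos hqm, hqs]
    simp only [Option.map_eq_map, Option.map_some, zero_add, hc', true_and]
  · have hqn : (PySem.List.pyRange 0 9 1)[q]? = none := by
      rw [PySem.List.getElem?_pyRange_one, if_neg (by omega)]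
    have hqm : ¬ ((q:Int) ∈ PySem.List.pyRange 0 9 1) := by
      rw [PySem.List.mem_pyRange_one]; omega
    rw [if_neg hqm, hqn]
    rfl

theorem pvPulse_plane (BW l1 u i : Int) :
    pvPlaneP BW l1 u (72*i) pvPlane0
      = (PySem.List.pyRange 0 10 1).map (fun j => (PySem.List.pyRange 0 9 1).map
          (fun k => if u*10+9-j < l1 ∧ -8*(9-j) + 72*i + 8*k < BW then -8*(9-j) + 72*i + 8*k else -8)) := by
  apply List.ext_getElem?
  intro q
  unfold pvPlaneP
  rw [pvFoldl_condModify (fun j => u*10+(9-j) < l1) (fun j => pvRowFillP BW j (72*i))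
        (PySem.List.pyRange 0 10 1) (PySem.List.nodup_pyRange_one 0 10) (pvRange_nonneg 0 10 le_rfl) pvPlane0 q]
  unfold pvPlane0
  rw [List.getElem?_map, List.getElem?_map]
  by_cases hq10 : q < 10
  · have hqs : (PySem.List.pyRange 0 10 1)[q]? = some (0+(q:Int)) := by
      rw [PySem.List.getElem?_pyRange_one, if_pos (by omega)]
    have hqm : (q:Int) ∈ PySem.List.pyRange 0 10 1 := PySem.List.mem_pyRange_one.mpr ⟨by omega, by omega⟩
    rw [hqs]
    by_cases hcq : u*10+(9-(q:Int)) < l1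
    · rw [if_pos ⟨hqm, hcq⟩]
      simp only [Option.map_eq_map, Option.map_some, zero_add]
      congr 1
      exact pvPulse_row BW l1 u i (q:Int) hcq
    · rw [if_neg (fun h => hcq h.2)]
      simp only [Option.map_eq_map, Option.map_some, zero_add]
      congr 1
      have hcf : ∀ k : Int, ¬(u*10+9-(q:Int) < l1 ∧ -8*(9-(q:Int)) + 72*i + 8*k < BW) := by
        intro k h
        exact absurd h.1 (by omega)
      unfold pvRow0
      refine Eq.symm (List.map_congr_left ?_)
      intro x _
      rw [if_neg (hcf x)]
  · have hqn : (PySem.List.pyRange 0 10 1)[q]? = none := by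
      rw [PySem.List.getElem?_pyRange_one, if_neg (by omega)]
    have hqm : ¬ ((q:Int) ∈ PySem.List.pyRange 0 10 1) := by
      rw [PySem.List.mem_pyRange_one]; omega
    rw [if_neg (fun h => hqm h.1), hqn]
    rfl

theorem pvPulse_slab (BW l1 t2 u : Int) :
    pvSlabP BW l1 u t2 (pvSlab0 t2)
      = (PySem.List.pyRange 0 t2 1).map (fun i => (PySem.List.pyRange 0 10 1).map
          (fun j => (PySem.List.pyRange 0 9 1).map
            (fun k => if u*10+9-j < l1 ∧ -8*(9-j) + 72*i + 8*k < BW then -8*(9-j) + 72*i + 8*k else -8))) := by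
  apply List.ext_getElem?
  intro q
  unfold pvSlabP
  rw [pvFoldl_modifyAll (fun i => pvPlaneP BW l1 u (72*i)) (PySem.List.pyRange 0 t2 1)
        (PySem.List.nodup_pyRange_one 0 t2) (pvRange_nonneg 0 t2 le_rfl) (pvSlab0 t2) q]
  unfold pvSlab0
  rw [List.getElem?_map, List.getElem?_map]
  by_cases hq : (q:Int) ∈ PySem.List.pyRange 0 t2 1
  · rw [if_pos hq]
    have hqs : (PySem.List.pyRange 0 t2 1)[q]? = some (0+(q:Int)) := by
      have := (PySem.List.mem_pyRange_one.mp hq).2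
      rw [PySem.List.getElem?_pyRange_one, if_pos (by omega)]
    rw [hqs]
    simp only [Option.map_eq_map, Option.map_some, zero_add]
    congr 1
    exact pvPulse_plane BW l1 u (q:Int)
  · rw [if_neg hq]
    have hqn : (PySem.List.pyRange 0 t2 1)[q]? = none := by
      rw [PySem.List.mem_pyRange_one] at hq
      push_neg at hq
      rw [PySem.List.getElem?_pyRange_one, if_neg (by omega)]
    rw [hqn]
    rfl

theorem pvPulse_main (BW l1 t1 t2 : Int) :
    (PySem.List.pyRange 0 t1 1).foldl (fun A u =>
      ((PySem.List.pyRange 0 t2 1).foldl (fun (As : List (List (List (List Int))) × Int) i =>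
        ((PySem.List.pyRange 0 10 1).foldl (fun A j =>
          if u*10+(9-j) < l1 then
            (PySem.List.pyRange 0 9 1).foldl (fun A k =>
              if -8*(9-j)+As.2+8*k < BW then pvSet4 A u.toNat i.toNat j.toNat k.toNat (-8*(9-j)+As.2+8*k)
              else pvSet4 A u.toNat i.toNat j.toNat k.toNat (-8)) A
          else A) As.1, As.2 + 9*8)) (A, 0)).1)
      ((PySem.List.pyRange 0 t1 1).map (fun _ => (PySem.List.pyRange 0 t2 1).map (fun _ =>
        (PySem.List.pyRange 0 10 1).map (fun _ => (PySem.List.pyRange 0 9 1).map (fun _ => (-8:Int))))))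
    = (PySem.List.pyRange 0 t1 1).map (fun u => (PySem.List.pyRange 0 t2 1).map (fun i =>
        (PySem.List.pyRange 0 10 1).map (fun j => (PySem.List.pyRange 0 9 1).map
          (fun k => if u*10+9-j < l1 ∧ -8*(9-j) + 72*i + 8*k < BW then -8*(9-j) + 72*i + 8*k else -8)))) := by
  have hbody : ∀ (A : List (List (List (List Int)))), ∀ u ∈ PySem.List.pyRange 0 t1 1,
      ((PySem.List.pyRange 0 t2 1).foldl (fun (As : List (List (List (List Int))) × Int) i =>
        ((PySem.List.pyRange 0 10 1).foldl (fun A j =>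
          if u*10+(9-j) < l1 then
            (PySem.List.pyRange 0 9 1).foldl (fun A k =>
              if -8*(9-j)+As.2+8*k < BW then pvSet4 A u.toNat i.toNat j.toNat k.toNat (-8*(9-j)+As.2+8*k)
              else pvSet4 A u.toNat i.toNat j.toNat k.toNat (-8)) A
          else A) As.1, As.2 + 9*8)) (A, 0)).1
        = A.modify u.toNat (pvSlabP BW l1 u t2) := by
    intro A u _
    exact pvPulse_ubody BW l1 t2 u A
  rw [PySem.List.foldl_congr_mem _ _ _ _ hbody]
  apply List.ext_getElem?
  intro q
  rw [pvFoldl_modifyAll (fun u => pvSlabP BW l1 u t2) (PySem.List.pyRange 0 t1 1)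
        (PySem.List.nodup_pyRange_one 0 t1) (pvRange_nonneg 0 t1 le_rfl) _ q]
  rw [List.getElem?_map, List.getElem?_map]
  by_cases hq : (q:Int) ∈ PySem.List.pyRange 0 t1 1
  · rw [if_pos hq]
    have hqs : (PySem.List.pyRange 0 t1 1)[q]? = some (0+(q:Int)) := by
      have := (PySem.List.mem_pyRange_one.mp hq).2
      rw [PySem.List.getElem?_pyRange_one, if_pos (by omega)]
    rw [hqs]
    simp only [Option.map_eq_map, Option.map_some, zero_add]
    congr 1
    exact pvPulse_slab BW l1 t2 (q:Int)
  · rw [if_neg hq]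
    have hqn : (PySem.List.pyRange 0 t1 1)[q]? = none := by
      rw [PySem.List.mem_pyRange_one] at hq
      push_neg at hq
      rw [PySem.List.getElem?_pyRange_one, if_neg (by omega)]
    rw [hqn]
    rfl

-- ===== rram side =====

def pvRowValR (l1 u j : Int) : Int := if u*10+9-j < l1 then (u*10+9-j)*8 else -8
def pvWLo (m : Int) : Int := max (9-m) 0
def pvWUp (l1 m : Int) : Int := 10 - max 0 (m - l1 + 1)

def pvPlaneStepR (l1 u k lo up : Int) (p : List (List Int)) : List (List Int) :=
  (PySem.List.pyRange lo up 1).foldl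
    (fun p j => p.modify j.toNat (fun r => r.set k.toNat (pvRowValR l1 u j))) p

def pvPlaneFullR (l1 u m : Int) (p : List (List Int)) : List (List Int) :=
  (PySem.List.pyRange 0 9 1).foldl
    (fun p k => pvPlaneStepR l1 u k (pvWLo (m+k)) (pvWUp l1 (m+k)) p) p

def pvCf (l1 m : Int) : Int × Int × Int := (min m l1, pvWLo m, pvWUp l1 m)

def pvSlabR (l1 u t2 : Int) (sl : List (List (List Int))) : List (List (List Int)) :=
  (PySem.List.pyRange 0 t2 1).foldl (fun sl i => sl.modify i.toNat (pvPlaneFullR l1 u (9*i))) sl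

def pvKStep (l1 u i : Int) :
    (List (List (List (List Int))) × Int × Int × Int) → Int → (List (List (List (List Int))) × Int × Int × Int) :=
  fun S k =>
    ((PySem.List.pyRange S.2.2.1 S.2.2.2 1).foldl (fun A j =>
        if u*10+9-j < l1 then pvSet4 A u.toNat i.toNat j.toNat k.toNat ((u*10+9-j)*8)
        else pvSet4 A u.toNat i.toNat j.toNat k.toNat (-8)) S.1,
     if S.2.1 < l1 then S.2.1 + 1 else S.2.1,
     if S.2.2.1 > 0 then S.2.2.1 - 1 else S.2.2.1,
     if (if S.2.1 < l1 then S.2.1 + 1 else S.2.1) = l1 then S.2.2.2 - 1 else S.2.2.2)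

theorem pvRram_jfold (l1 u i k lo up : Int) (A : List (List (List (List Int)))) :
    (PySem.List.pyRange lo up 1).foldl (fun A j =>
        if u*10+9-j < l1 then pvSet4 A u.toNat i.toNat j.toNat k.toNat ((u*10+9-j)*8)
        else pvSet4 A u.toNat i.toNat j.toNat k.toNat (-8)) A
      = A.modify u.toNat (fun sl => sl.modify i.toNat (pvPlaneStepR l1 u k lo up)) := by
  have hbody : (fun (A : List (List (List (List Int)))) (j : Int) =>
      if u*10+9-j < l1 then pvSet4 A u.toNat i.toNat j.toNat k.toNat ((u*10+9-j)*8)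
      else pvSet4 A u.toNat i.toNat j.toNat k.toNat (-8))
      = (fun A j => A.modify u.toNat (fun sl => sl.modify i.toNat (fun p => p.modify j.toNat
          (fun r => r.set k.toNat (pvRowValR l1 u j))))) := by
    funext A j
    by_cases h : u*10+9-j < l1 <;> simp [h, pvSet4, pvRowValR]
  rw [hbody]
  refine (pvFoldl_modify_const _ _ _ _).trans ?_
  congr 1
  funext sl
  exact pvFoldl_modify_const _ _ _ _

theorem pvKStep_eq (l1 u i : Int) (h1 : 1 ≤ l1) (m : Int) (hm : 0 ≤ m)
    (A : List (List (List (List Int)))) (k : Int) :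
    pvKStep l1 u i (A, pvCf l1 m) k
      = (A.modify u.toNat (fun sl => sl.modify i.toNat (pvPlaneStepR l1 u k (pvWLo m) (pvWUp l1 m))),
         pvCf l1 (m+1)) := by
  show (_, _, _, _) = (_, _, _, _)
  rw [Prod.mk.injEq]
  constructor
  · exact pvRram_jfold l1 u i k (pvWLo m) (pvWUp l1 m) A
  · simp only [pvCf, pvWLo, pvWUp, Prod.mk.injEq]
    refine ⟨?_, ?_, ?_⟩ <;> split_ifs <;> omega

theorem pvRram_kfold (l1 u i : Int) (h1 : 1 ≤ l1) (m0 : Int) (hm : 0 ≤ m0) :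
    ∀ (n : Nat), (n:Int) ≤ 9 → ∀ (A : List (List (List (List Int)))),
    (PySem.List.pyRange (9-(n:Int)) 9 1).foldl (pvKStep l1 u i) (A, pvCf l1 (m0 + (9-(n:Int))))
      = (A.modify u.toNat (fun sl => sl.modify i.toNat (fun p =>
          (PySem.List.pyRange (9-(n:Int)) 9 1).foldl
            (fun p k => pvPlaneStepR l1 u k (pvWLo (m0+k)) (pvWUp l1 (m0+k)) p) p)),
         pvCf l1 (m0+9)) := by
  intro n
  induction n with
  | zero =>
      intro _ A
      rw [show ((9:Int)-((0:Nat):Int)) = 9 by norm_num]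
      rw [PySem.List.pyRange_one_eq_nil (le_refl (9:Int))]
      simp only [List.foldl_nil]
      rw [show m0 + 9 = m0 + 9 from rfl]
      have e1 : (fun (sl : List (List (List Int))) => sl.modify i.toNat (fun p => p))
          = (fun sl => sl) := by funext sl; exact pvModify_id' sl i.toNat
      rw [e1, pvModify_id']
  | succ n' ih =>
      intro hn A
      have hb : (9 - ((n'+1:Nat):Int)) < 9 := by push_cast; omega
      rw [PySem.List.pyRange_one_cons hb]
      simp only [List.foldl_cons]
      rw [pvKStep_eq l1 u i h1 (m0 + (9-((n'+1:Nat):Int))) (by push_cast at hn ⊢; omega) A]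
      have hstep : m0 + (9-((n'+1:Nat):Int)) + 1 = m0 + (9-((n':Nat):Int)) := by push_cast; ring
      have hidx : (9-((n'+1:Nat):Int)) + 1 = 9 - ((n':Nat):Int) := by push_cast; ring
      rw [hstep, hidx]
      rw [ih (by push_cast at hn ⊢; omega)]
      rw [Prod.mk.injEq]
      refine ⟨?_, rfl⟩
      rw [pvModify_modify]
      congr 1
      funext sl
      rw [pvModify_modify]

theorem pvRram_ifold (l1 u t2 : Int) (h1 : 1 ≤ l1) :
    ∀ (n : Nat) (b : Int), 0 ≤ b → (t2 - b).toNat = n → ∀ (A : List (List (List (List Int)))),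
    ((PySem.List.pyRange b t2 1).foldl
        (fun S i => (PySem.List.pyRange 0 9 1).foldl (pvKStep l1 u i) S) (A, pvCf l1 (9*b))).1
      = (PySem.List.pyRange b t2 1).foldl
          (fun A i => A.modify u.toNat (fun sl => sl.modify i.toNat (pvPlaneFullR l1 u (9*i)))) A := by
  intro n
  induction n with
  | zero =>
      intro b hb hn A
      rw [PySem.List.pyRange_one_eq_nil (show t2 ≤ b by omega)]
      rfl
  | succ n' ih =>
      intro b hb hn A
      have hbt : b < t2 := by omega
      rw [PySem.List.pyRange_one_cons hbt]
      simp only [List.foldl_cons]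
      have hk := pvRram_kfold l1 u b h1 (9*b) (by omega) 9 (by norm_num) A
      rw [show ((9:Int)-((9:Nat):Int)) = 0 by norm_num] at hk
      rw [show (9*b + (0:Int)) = 9*b by ring] at hk
      rw [hk]
      rw [show (9*b+9 : Int) = 9*(b+1) by ring]
      rw [ih (b+1) (by omega) (by omega)]
      rfl

theorem pvPlaneStepR_getElem (l1 u k lo up : Int) (hlo : 0 ≤ lo)
    (p : List (List Int)) (q : Nat) :
    (pvPlaneStepR l1 u k lo up p)[q]?
      = if lo ≤ (q:Int) ∧ (q:Int) < up then (fun r => r.set k.toNat (pvRowValR l1 u (q:Int))) <$> p[q]? else p[q]? := by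
  unfold pvPlaneStepR
  rw [pvFoldl_modifyAll (fun j => fun r => r.set k.toNat (pvRowValR l1 u j)) (PySem.List.pyRange lo up 1)
        (PySem.List.nodup_pyRange_one lo up) (pvRange_nonneg lo up hlo) p q]
  simp only [PySem.List.mem_pyRange_one]

theorem pvPlaneSteps_getElem (l1 u : Int) :
    ∀ (ks : List Int) (lo up : Int → Int), (∀ k ∈ ks, 0 ≤ lo k) → ∀ (p : List (List Int)) (q : Nat),
    (ks.foldl (fun p k => pvPlaneStepR l1 u k (lo k) (up k) p) p)[q]?
      = (fun r => ks.foldl (fun r k =>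
            if lo k ≤ (q:Int) ∧ (q:Int) < up k then r.set k.toNat (pvRowValR l1 u (q:Int)) else r) r) <$> p[q]? := by
  intro ks
  induction ks with
  | nil => intro lo up _ p q; cases h : p[q]? <;> simp [h]
  | cons k ks ih =>
      intro lo up h p q
      simp only [List.foldl_cons]
      rw [ih lo up (fun k2 hk2 => h k2 (by simp [hk2])) _ q,
          pvPlaneStepR_getElem l1 u k (lo k) (up k) (h k (by simp)) p q]
      by_cases hc : lo k ≤ (q:Int) ∧ (q:Int) < up k
      · rw [if_pos hc]; cases h2 : p[q]? <;> simp [h2, hc]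
      · rw [if_neg hc]; cases h2 : p[q]? <;> simp [h2, hc]

theorem pvRram_row (l1 u i j : Int) :
    (PySem.List.pyRange 0 9 1).foldl (fun r k =>
        if pvWLo (9*i+k) ≤ j ∧ j < pvWUp l1 (9*i+k) then r.set k.toNat (pvRowValR l1 u j) else r) pvRow0
      = (PySem.List.pyRange 0 9 1).map (fun k =>
          if max (9-(i*9+k)) 0 ≤ j ∧ j < 10 - max 0 (i*9+k - l1 + 1) ∧ u*10+9-j < l1 then (u*10+9-j)*8 else -8) := by
  have hbody : (fun (r : List Int) (k : Int) =>
      if pvWLo (9*i+k) ≤ j ∧ j < pvWUp l1 (9*i+k) then r.set k.toNat (pvRowValR l1 u j) else r)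
      = (fun r k => if pvWLo (9*i+k) ≤ j ∧ j < pvWUp l1 (9*i+k) then r.modify k.toNat (fun _ => pvRowValR l1 u j) else r) := by
    funext r k; rw [pvSet_eq_modify]
  rw [hbody]
  apply List.ext_getElem?
  intro q
  rw [pvFoldl_condModify (fun k => pvWLo (9*i+k) ≤ j ∧ j < pvWUp l1 (9*i+k)) (fun _ => fun _ => pvRowValR l1 u j)
        (PySem.List.pyRange 0 9 1) (PySem.List.nodup_pyRange_one 0 9) (pvRange_nonneg 0 9 le_rfl) pvRow0 q]
  rw [List.getElem?_map]
  unfold pvRow0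
  rw [List.getElem?_map]
  by_cases hq : (q:Int) ∈ PySem.List.pyRange 0 9 1
  · have hq9 : (q:Int) < 9 := (PySem.List.mem_pyRange_one.mp hq).2
    have hqs : (PySem.List.pyRange 0 9 1)[q]? = some (0+(q:Int)) := by
      rw [PySem.List.getElem?_pyRange_one, if_pos (by omega)]
    rw [hqs]
    simp only [Option.map_eq_map, Option.map_some, zero_add]
    by_cases hc : pvWLo (9*i+(q:Int)) ≤ j ∧ j < pvWUp l1 (9*i+(q:Int))
    · rw [if_pos ⟨hq, hc⟩]
      congr 1
      obtain ⟨hc1, hc2⟩ := hc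
      simp only [pvWLo, pvWUp] at hc1 hc2
      simp only [pvRowValR]
      split_ifs <;> first | rfl | omega
    · rw [if_neg (fun h => hc h.2)]
      congr 1
      have hneg : ¬(max (9-(i*9+(q:Int))) 0 ≤ j ∧ j < 10 - max 0 (i*9+(q:Int) - l1 + 1) ∧ u*10+9-j < l1) := by
        intro h
        obtain ⟨ha, hb2, _⟩ := h
        simp only [pvWLo, pvWUp] at hc
        exact hc ⟨by omega, by omega⟩
      rw [if_neg hneg]
  · rw [if_neg (fun h => hq h.1)]
    have hqn : (PySem.List.pyRange 0 9 1)[q]? = none := by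
      rw [PySem.List.mem_pyRange_one] at hq
      push_neg at hq
      rw [PySem.List.getElem?_pyRange_one, if_neg (by omega)]
    rw [hqn]
    rfl

theorem pvRram_plane (l1 u i : Int) :
    pvPlaneFullR l1 u (9*i) pvPlane0
      = (PySem.List.pyRange 0 10 1).map (fun j => (PySem.List.pyRange 0 9 1).map (fun k =>
          if max (9-(i*9+k)) 0 ≤ j ∧ j < 10 - max 0 (i*9+k - l1 + 1) ∧ u*10+9-j < l1 then (u*10+9-j)*8 else -8)) := by
  apply List.ext_getElem?
  intro q
  unfold pvPlaneFullR
  rw [pvPlaneSteps_getElem l1 u (PySem.List.pyRange 0 9 1)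
        (fun k => pvWLo (9*i+k)) (fun k => pvWUp l1 (9*i+k))
        (fun k _ => by simp only [pvWLo]; exact le_max_right _ _) pvPlane0 q]
  rw [List.getElem?_map]
  unfold pvPlane0
  rw [List.getElem?_map]
  by_cases hq10 : q < 10
  · have hqs : (PySem.List.pyRange 0 10 1)[q]? = some (0+(q:Int)) := by
      rw [PySem.List.getElem?_pyRange_one]; simp; omega
    rw [hqs]
    simp only [Option.map_eq_map, Option.map_some, zero_add]
    congr 1
    exact pvRram_row l1 u i (q:Int)
  · have hqnone : (PySem.List.pyRange 0 10 1)[q]? = none := by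
      rw [PySem.List.getElem?_pyRange_one]; simp; omega
    rw [hqnone]
    rfl

theorem pvRram_slab (l1 t2 u : Int) :
    pvSlabR l1 u t2 (pvSlab0 t2)
      = (PySem.List.pyRange 0 t2 1).map (fun i => (PySem.List.pyRange 0 10 1).map
          (fun j => (PySem.List.pyRange 0 9 1).map (fun k =>
            if max (9-(i*9+k)) 0 ≤ j ∧ j < 10 - max 0 (i*9+k - l1 + 1) ∧ u*10+9-j < l1 then (u*10+9-j)*8 else -8))) := by
  apply List.ext_getElem?
  intro q
  unfold pvSlabR
  rw [pvFoldl_modifyAll (fun i => pvPlaneFullR l1 u (9*i)) (PySem.List.pyRange 0 t2 1)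
        (PySem.List.nodup_pyRange_one 0 t2) (pvRange_nonneg 0 t2 le_rfl) (pvSlab0 t2) q]
  unfold pvSlab0
  rw [List.getElem?_map, List.getElem?_map]
  by_cases hq : (q:Int) ∈ PySem.List.pyRange 0 t2 1
  · rw [if_pos hq]
    have hqs : (PySem.List.pyRange 0 t2 1)[q]? = some (0+(q:Int)) := by
      have := (PySem.List.mem_pyRange_one.mp hq).2
      rw [PySem.List.getElem?_pyRange_one, if_pos (by omega)]
    rw [hqs]
    simp only [Option.map_eq_map, Option.map_some, zero_add]
    rw [pvRram_plane l1 u (q:Int)]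
  · rw [if_neg hq]
    have hqn : (PySem.List.pyRange 0 t2 1)[q]? = none := by
      rw [PySem.List.mem_pyRange_one] at hq
      push_neg at hq
      rw [PySem.List.getElem?_pyRange_one, if_neg (by omega)]
    rw [hqn]
    rfl

theorem pvRram_main (l1 t1 t2 : Int) (hpos : 0 < t1 → 1 ≤ l1) :
    (PySem.List.pyRange 0 t1 1).foldl (fun A u =>
      ((PySem.List.pyRange 0 t2 1).foldl (fun (S : List (List (List (List Int))) × Int × Int × Int) i =>
        (PySem.List.pyRange 0 9 1).foldl (fun (S : List (List (List (List Int))) × Int × Int × Int) k =>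
          ((PySem.List.pyRange S.2.2.1 S.2.2.2 1).foldl (fun A j =>
            if u*10+9-j < l1 then pvSet4 A u.toNat i.toNat j.toNat k.toNat ((u*10+9-j)*8)
            else pvSet4 A u.toNat i.toNat j.toNat k.toNat (-8)) S.1,
           if S.2.1 < l1 then S.2.1 + 1 else S.2.1,
           if S.2.2.1 > 0 then S.2.2.1 - 1 else S.2.2.1,
           if (if S.2.1 < l1 then S.2.1 + 1 else S.2.1) = l1 then S.2.2.2 - 1 else S.2.2.2)) S) (A, (0, 9, 10))).1)
      ((PySem.List.pyRange 0 t1 1).map (fun _ => (PySem.List.pyRange 0 t2 1).map (fun _ =>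
        (PySem.List.pyRange 0 10 1).map (fun _ => (PySem.List.pyRange 0 9 1).map (fun _ => (-8:Int))))))
    = (PySem.List.pyRange 0 t1 1).map (fun u => (PySem.List.pyRange 0 t2 1).map (fun i =>
        (PySem.List.pyRange 0 10 1).map (fun j => (PySem.List.pyRange 0 9 1).map (fun k =>
          if max (9-(i*9+k)) 0 ≤ j ∧ j < 10 - max 0 (i*9+k - l1 + 1) ∧ u*10+9-j < l1 then (u*10+9-j)*8 else -8)))) := by
  by_cases ht1 : t1 ≤ 0
  · rw [PySem.List.pyRange_one_eq_nil ht1]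
    rfl
  · have h1 : 1 ≤ l1 := hpos (by omega)
    have hbody : ∀ (A : List (List (List (List Int)))), ∀ u ∈ PySem.List.pyRange 0 t1 1,
        ((PySem.List.pyRange 0 t2 1).foldl (fun (S : List (List (List (List Int))) × Int × Int × Int) i =>
          (PySem.List.pyRange 0 9 1).foldl (fun (S : List (List (List (List Int))) × Int × Int × Int) k =>
            ((PySem.List.pyRange S.2.2.1 S.2.2.2 1).foldl (fun A j =>
              if u*10+9-j < l1 then pvSet4 A u.toNat i.toNat j.toNat k.toNat ((u*10+9-j)*8)
              else pvSet4 A u.toNat i.toNat j.toNat k.toNat (-8)) S.1,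
             if S.2.1 < l1 then S.2.1 + 1 else S.2.1,
             if S.2.2.1 > 0 then S.2.2.1 - 1 else S.2.2.1,
             if (if S.2.1 < l1 then S.2.1 + 1 else S.2.1) = l1 then S.2.2.2 - 1 else S.2.2.2)) S) (A, (0, 9, 10))).1
          = A.modify u.toNat (pvSlabR l1 u t2) := by
      intro A u _
      show ((PySem.List.pyRange 0 t2 1).foldl
          (fun S i => (PySem.List.pyRange 0 9 1).foldl (pvKStep l1 u i) S) (A, ((0:Int), (9:Int), (10:Int)))).1 = _
      have h0 : ((0:Int), (9:Int), (10:Int)) = pvCf l1 0 := by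
        simp only [pvCf, pvWLo, pvWUp, Prod.mk.injEq]
        omega
      rw [h0]
      have hif := pvRram_ifold l1 u t2 h1 (t2-0).toNat 0 le_rfl rfl A
      rw [show (9*(0:Int)) = 0 from by ring] at hif
      rw [hif]
      exact pvFoldl_modify_const _ _ _ _
    rw [PySem.List.foldl_congr_mem _ _ _ _ hbody]
    apply List.ext_getElem?
    intro q
    rw [pvFoldl_modifyAll (fun u => pvSlabR l1 u t2) (PySem.List.pyRange 0 t1 1)
          (PySem.List.nodup_pyRange_one 0 t1) (pvRange_nonneg 0 t1 le_rfl) _ q]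
    rw [List.getElem?_map, List.getElem?_map]
    by_cases hq : (q:Int) ∈ PySem.List.pyRange 0 t1 1
    · rw [if_pos hq]
      have hqs : (PySem.List.pyRange 0 t1 1)[q]? = some (0+(q:Int)) := by
        have := (PySem.List.mem_pyRange_one.mp hq).2
        rw [PySem.List.getElem?_pyRange_one, if_pos (by omega)]
      rw [hqs]
      simp only [Option.map_eq_map, Option.map_some, zero_add]
      congr 1
      exact pvRram_slab l1 t2 (q:Int)
    · rw [if_neg hq]
      have hqn : (PySem.List.pyRange 0 t1 1)[q]? = none := by
        rw [PySem.List.mem_pyRange_one] at hq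
        push_neg at hq
        rw [PySem.List.getElem?_pyRange_one, if_neg (by omega)]
      rw [hqn]
      rfl

-- ===== VERDICT (by name: the statement is the Claim_ definition above) =====
theorem BWSplit_spec : Claim_equal_BWSplit := by
  intro BW _
  unfold Spec_BWSplit BWSplit BWSplit_alt
  dsimp only
  refine congrArg₂ Prod.mk ?_ ?_
  · apply pvRram_main
    intro ht1
    have h2 : PySem.Int.floordiv (-(PySem.Int.truncdiv BW 8)) 10 < 0 := by omega
    have h3 := (PySem.Int.floordiv_lt_iff_lt_mul (by norm_num : (0:Int) < 10)).mp h2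
    omega
  · exact pvPulse_main BW (PySem.Int.truncdiv BW 8)
      (-(PySem.Int.floordiv (-(PySem.Int.truncdiv BW 8)) 10))
      (-(PySem.Int.floordiv (-(PySem.Int.truncdiv BW 8 + 9)) 9))
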